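-- pv_equiv track=rewrite | github.com/cla7aye15I4nd/Tython | tests/algorithm/test_math_algorithms.py | pascal_row_mod
-- ===== SOURCE A (Python) =====
-- def pascal_row_mod(n: int, mod: int) -> list[int]:
--     row: list[int] = []
--     i: int = 0
--     while i <= n:
--         row.append(0)
--         i = i + 1
--     row[0] = 1
--
--     r: int = 1
--     while r <= n:
--         c: int = r
--         while c > 0:
--             row[c] = (row[c] + row[c - 1]) % mod
--             c = c - 1
--         r = r + 1
--     return row
-- ===== SOURCE B (Python) =====
-- def pascal_row_mod(n: int, mod: int) -> list[int]:
--     row: list[int] = [0] * (n + 1)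
--     row[0] = 1
--     c: int = 1
--     for k in range(1, n + 1):
--         c = c * (n - k + 1) // k
--         row[k] = c % mod
--     return row
-- ===== Notes on version B (the rewrite author's own statement) =====
-- stated objective: faster
-- what changed: Replaces the O(n^2) in-place Pascal additive recurrence (nested while loops updating the row right-to-left) with a single O(n) pass computing each entry directly as the binomial coefficient via the exact multiplicative recurrence c = c*(n-k+1)//k, reduced mod mod.
import Mathlib
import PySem

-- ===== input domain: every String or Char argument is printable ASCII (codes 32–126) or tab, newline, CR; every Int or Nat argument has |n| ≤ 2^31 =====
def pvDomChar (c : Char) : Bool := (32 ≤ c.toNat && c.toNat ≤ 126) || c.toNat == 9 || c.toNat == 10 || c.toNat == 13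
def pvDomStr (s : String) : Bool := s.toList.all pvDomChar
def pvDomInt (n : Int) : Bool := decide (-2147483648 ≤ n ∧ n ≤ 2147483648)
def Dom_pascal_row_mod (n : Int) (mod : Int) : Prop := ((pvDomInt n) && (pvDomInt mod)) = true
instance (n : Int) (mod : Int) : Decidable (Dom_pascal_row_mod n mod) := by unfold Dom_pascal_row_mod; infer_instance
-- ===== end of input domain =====

-- B replaces A's O(n^2) additive Pascal recurrence with one O(n) pass computing each
-- entry as the binomial coefficient via the exact multiplicative recurrence (faster).


-- ===== PORT A =====
-- first while loop: row.append(0) while i <= n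
def pvFillA (n : Int) (i : Int) (row : List Int) : List Int :=
  if i ≤ n then pvFillA n (i + 1) (row ++ [0]) else row
termination_by (n + 1 - i).toNat
decreasing_by omega

-- inner while loop: row[c] = (row[c] + row[c-1]) % mod, c descending
def pvInnerA (mod : Int) (c : Int) (row : List Int) : List Int :=
  if 0 < c then
    pvInnerA mod (c - 1)
      (row.set c.toNat (PySem.Int.mod (row.getD c.toNat 0 + row.getD (c - 1).toNat 0) mod))
  else row
termination_by c.toNat
decreasing_by omega

-- outer while loop over r
def pvOuterA (n : Int) (mod : Int) (r : Int) (row : List Int) : List Int :=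
  if r ≤ n then pvOuterA n mod (r + 1) (pvInnerA mod r row) else row
termination_by (n + 1 - r).toNat
decreasing_by omega

def pascal_row_mod (n : Int) (mod : Int) : List Int :=
  pvOuterA n mod 1 ((pvFillA n 0 []).set 0 1)

-- ===== PORT B =====
-- for k in range(1, n+1): c = c*(n-k+1)//k; row[k] = c % mod
def pvLoopB (n : Int) (mod : Int) (k : Int) (c : Int) (row : List Int) : List Int :=
  if k ≤ n then
    let c' := PySem.Int.floordiv (c * (n - k + 1)) k
    pvLoopB n mod (k + 1) c' (row.set k.toNat (PySem.Int.mod c' mod))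
  else row
termination_by (n + 1 - k).toNat
decreasing_by omega

def pascal_row_mod_alt (n : Int) (mod : Int) : List Int :=
  pvLoopB n mod 1 1 ((List.replicate (n + 1).toNat 0).set 0 1)

-- ===== PRECONDITION & SPEC =====
-- Pre_ excludes exactly where the Python A raises: n < 0 (IndexError on row[0] = 1,
-- the list is empty) and mod = 0 with n ≥ 1 (ZeroDivisionError in the inner loop).
def Pre_pascal_row_mod (n : Int) (mod : Int) : Prop := 0 ≤ n ∧ (mod ≠ 0 ∨ n = 0)
instance (n : Int) (mod : Int) : Decidable (Pre_pascal_row_mod n mod) := by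
  unfold Pre_pascal_row_mod; infer_instance
def pvWitness_pascal_row_mod : Int × Int := (4, 7)

def Spec_pascal_row_mod (n : Int) (mod : Int) (out : List Int) : Prop := out = pascal_row_mod_alt n mod
instance (n : Int) (mod : Int) (out : List Int) : Decidable (Spec_pascal_row_mod n mod out) := by unfold Spec_pascal_row_mod; infer_instance

-- ===== CLAIM (what is proved, stated in full; the proofs are below) =====
def Claim_equal_pascal_row_mod : Prop := ∀ (n : Int) (mod : Int), Dom_pascal_row_mod n mod → Pre_pascal_row_mod n mod → Spec_pascal_row_mod n mod (pascal_row_mod n mod)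

-- ===== LEMMAS AND PROOFS =====

-- the row state as a map over indices 0..N
def pvSt (N : ℕ) (f : ℕ → Int) : List Int := (List.range (N + 1)).map f

-- row contents after outer iteration r of A: [1, C(r,1)%m, …, C(r,r)%m, 0, …]
def pvOld (m : Int) (r : ℕ) (j : ℕ) : Int :=
  if j = 0 then 1 else if j ≤ r then PySem.Int.mod (r.choose j : Int) m else 0

-- mid-inner-loop state: indices ≤ c still hold row r-1, indices > c already row r
def pvMix (m : Int) (r : ℕ) (c : ℕ) (j : ℕ) : Int :=
  if j = 0 then 1 else if j ≤ c then pvOld m (r - 1) j else pvOld m r j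

-- B's state after writing indices < k
def pvGB (m : Int) (N : ℕ) (t : ℕ) (j : ℕ) : Int :=
  if j = 0 then 1 else if j ≤ t then PySem.Int.mod (N.choose j : Int) m else 0

theorem pvOld_pos (m : Int) (r j : ℕ) (h : 1 ≤ j) :
    pvOld m r j = PySem.Int.mod (r.choose j : Int) m := by
  unfold pvOld
  rw [if_neg (by omega)]
  rcases le_or_gt j r with hj | hj
  · rw [if_pos hj]
  · rw [if_neg (by omega), Nat.choose_eq_zero_of_lt hj]
    simp [PySem.Int.mod, Int.zero_fmod]

theorem pvOld_gt (m : Int) (r j : ℕ) (h : r < j) : pvOld m r j = 0 := by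
  unfold pvOld
  rw [if_neg (by omega), if_neg (by omega)]

theorem pvmod_add_left (a b m : Int) :
    PySem.Int.mod (PySem.Int.mod a m + b) m = PySem.Int.mod (a + b) m := by
  unfold PySem.Int.mod
  rw [Int.add_fmod, Int.fmod_fmod_of_dvd _ dvd_rfl, ← Int.add_fmod]

theorem pvmod_add_right (a b m : Int) :
    PySem.Int.mod (a + PySem.Int.mod b m) m = PySem.Int.mod (a + b) m := by
  rw [add_comm, pvmod_add_left, add_comm]

theorem pvFillA_eq (n : Int) : ∀ (fuel : ℕ) (i : Int), (n + 1 - i).toNat ≤ fuel →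
    ∀ row, pvFillA n i row = row ++ List.replicate (n + 1 - i).toNat 0 := by
  intro fuel
  induction fuel with
  | zero => intro i h row; unfold pvFillA; have : ¬ i ≤ n := by omega
            simp [this, show (n + 1 - i).toNat = 0 by omega]
  | succ f ih =>
    intro i h row
    unfold pvFillA
    by_cases hi : i ≤ n
    · rw [if_pos hi, ih (i + 1) (by omega)]
      have h1 : (n + 1 - i).toNat = (n + 1 - (i + 1)).toNat + 1 := by omega
      rw [h1, List.append_assoc]
      simp [List.replicate_succ]
    · simp [hi, show (n + 1 - i).toNat = 0 by omega]

theorem pvSt_getD (N : ℕ) (f : ℕ → Int) (j : ℕ) (h : j ≤ N) :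
    (pvSt N f).getD j 0 = f j := by
  unfold pvSt
  rw [List.getD_eq_getElem?_getD]
  simp [Nat.lt_succ_of_le h]

theorem pvSt_set (N : ℕ) (f : ℕ → Int) (j : ℕ) (v : Int) :
    (pvSt N f).set j v = pvSt N (fun t => if t = j then v else f t) := by
  unfold pvSt
  apply List.ext_getElem
  · simp
  · intro i h1 h2
    simp only [List.getElem_set, List.getElem_map, List.getElem_range]
    rcases eq_or_ne j i with hij | hij
    · simp [hij]
    · simp [hij, Ne.symm hij]

theorem pvSt_congr (N : ℕ) (f g : ℕ → Int) (h : ∀ j, f j = g j) :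
    pvSt N f = pvSt N g := by
  unfold pvSt
  exact List.map_congr_left (fun j _ => h j)

-- inner-loop invariant of A
theorem pvInnerA_eq (m : Int) (N r : ℕ) (hr1 : 1 ≤ r) (hrN : r ≤ N) :
    ∀ c, c ≤ r → pvInnerA m (c : Int) (pvSt N (pvMix m r c)) = pvSt N (pvOld m r) := by
  intro c
  induction c with
  | zero =>
    intro _
    unfold pvInnerA
    rw [if_neg (by simp)]
    apply pvSt_congr
    intro j
    unfold pvMix
    by_cases hj : j = 0
    · simp [hj, pvOld]
    · rw [if_neg hj, if_neg (by omega)]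
  | succ c ih =>
    intro hc
    unfold pvInnerA
    have hpos : (0 : Int) < ((c + 1 : ℕ) : Int) := by exact_mod_cast Nat.succ_pos c
    rw [if_pos hpos]
    have ht1 : ((c + 1 : ℕ) : Int).toNat = c + 1 := by simp
    have ht2 : (((c + 1 : ℕ) : Int) - 1).toNat = c := by omega
    have ht3 : ((c + 1 : ℕ) : Int) - 1 = (c : Int) := by push_cast; ring
    rw [ht1, ht2, ht3]
    rw [pvSt_getD N _ (c + 1) (by omega), pvSt_getD N _ c (by omega), pvSt_set]
    have hpascal : (r - 1).choose c + (r - 1).choose (c + 1) = r.choose (c + 1) := by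
      calc (r - 1).choose c + (r - 1).choose (c + 1)
          = (r - 1 + 1).choose (c + 1) := (Nat.choose_succ_succ (r - 1) c).symm
        _ = r.choose (c + 1) := by rw [show r - 1 + 1 = r by omega]
    have hx : pvMix m r (c + 1) (c + 1) = PySem.Int.mod ((r - 1).choose (c + 1) : Int) m := by
      unfold pvMix
      rw [if_neg (by omega), if_pos (by omega), pvOld_pos _ _ _ (by omega)]
    have hkey : PySem.Int.mod (pvMix m r (c + 1) (c + 1) + pvMix m r (c + 1) c) m
        = PySem.Int.mod (r.choose (c + 1) : Int) m := by
      by_cases hc0 : c = 0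
      · subst hc0
        have hy : pvMix m r 1 0 = 1 := by unfold pvMix; simp
        rw [hx, hy, pvmod_add_left]
        congr 1
        have h0 : (r - 1).choose 0 = 1 := Nat.choose_zero_right _
        omega
      · have hy : pvMix m r (c + 1) c = PySem.Int.mod ((r - 1).choose c : Int) m := by
          unfold pvMix
          rw [if_neg hc0, if_pos (by omega), pvOld_pos _ _ _ (by omega)]
        rw [hx, hy, pvmod_add_left, pvmod_add_right]
        congr 1
        omega
    have hupd : (fun t => if t = c + 1 then
          PySem.Int.mod (pvMix m r (c + 1) (c + 1) + pvMix m r (c + 1) c) m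
        else pvMix m r (c + 1) t) = pvMix m r c := by
      funext t
      by_cases ht : t = c + 1
      · subst ht
        rw [if_pos rfl, hkey]
        unfold pvMix
        rw [if_neg (by omega), if_neg (by omega)]
        unfold pvOld
        rw [if_neg (by omega), if_pos (by omega)]
      · rw [if_neg ht]
        unfold pvMix
        by_cases ht0 : t = 0
        · simp [ht0]
        · rw [if_neg ht0, if_neg ht0]
          by_cases htc : t ≤ c
          · rw [if_pos (by omega), if_pos htc]
          · rw [if_neg (by omega), if_neg htc]
    rw [hupd]
    exact ih (by omega)

-- outer-loop invariant of A
theorem pvOuterA_eq (m : Int) (N : ℕ) :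
    ∀ (fuel : ℕ) (r : ℕ), N + 1 - r ≤ fuel → 1 ≤ r → r ≤ N + 1 →
    pvOuterA (N : Int) m (r : Int) (pvSt N (pvOld m (r - 1))) = pvSt N (pvOld m N) := by
  intro fuel
  induction fuel with
  | zero =>
    intro r h h1 h2
    have hr : r = N + 1 := by omega
    subst hr
    unfold pvOuterA
    rw [if_neg (by exact_mod_cast (by omega : ¬ ((N + 1 : ℕ) : Int) ≤ (N : Int)))]
    rw [show N + 1 - 1 = N by omega]
  | succ f ih =>
    intro r h h1 h2
    by_cases hr : r ≤ N
    · unfold pvOuterA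
      rw [if_pos (by exact_mod_cast hr)]
      have hmix : pvSt N (pvOld m (r - 1)) = pvSt N (pvMix m r r) := by
        apply pvSt_congr
        intro j
        unfold pvMix
        by_cases hj0 : j = 0
        · simp [hj0, pvOld]
        · by_cases hjr : j ≤ r
          · rw [if_neg hj0, if_pos hjr]
          · rw [if_neg hj0, if_neg hjr, pvOld_gt m (r - 1) j (by omega),
              pvOld_gt m r j (by omega)]
      rw [hmix, pvInnerA_eq m N r h1 hr r (le_refl r)]
      have hcast : ((r : Int) + 1) = ((r + 1 : ℕ) : Int) := by push_cast; ring
      rw [hcast]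
      have h' := ih (r + 1) (by omega) (by omega) (by omega)
      rw [show r + 1 - 1 = r by omega] at h'
      exact h'
    · have hr' : r = N + 1 := by omega
      subst hr'
      unfold pvOuterA
      rw [if_neg (by exact_mod_cast (by omega : ¬ ((N + 1 : ℕ) : Int) ≤ (N : Int)))]
      rw [show N + 1 - 1 = N by omega]

-- A's initial row (after row[0] = 1)
theorem pvInitA (N : ℕ) (m : Int) :
    (List.replicate (N + 1) (0 : Int)).set 0 1 = pvSt N (pvOld m 0) := by
  apply List.ext_getElem
  · simp [pvSt]
  · intro i h1 h2
    simp only [List.getElem_set, List.getElem_replicate, pvSt, List.getElem_map,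
      List.getElem_range]
    unfold pvOld
    by_cases hi : i = 0 <;> simp [hi]
    omega

-- characterization of A
theorem pascal_row_mod_eq (n m : Int) (hn : 0 ≤ n) :
    pascal_row_mod n m = pvSt n.toNat (pvOld m n.toNat) := by
  obtain ⟨N, rfl⟩ : ∃ N : ℕ, n = (N : Int) := ⟨n.toNat, by omega⟩
  simp only [Int.toNat_natCast]
  unfold pascal_row_mod
  rw [pvFillA_eq (N : Int) ((N : Int) + 1 - 0).toNat 0 (le_refl _) []]
  simp only [List.nil_append, sub_zero]
  rw [show ((N : Int) + 1).toNat = N + 1 by omega, pvInitA N m]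
  have h := pvOuterA_eq m N (N + 1 - 1) 1 (le_refl _) (le_refl _) (by omega)
  simpa using h

-- B's loop invariant
theorem pvLoopB_eq (m : Int) (N : ℕ) :
    ∀ (fuel : ℕ) (k : ℕ), N + 1 - k ≤ fuel → 1 ≤ k → k ≤ N + 1 →
    pvLoopB (N : Int) m (k : Int) ((N.choose (k - 1) : ℕ) : Int) (pvSt N (pvGB m N (k - 1)))
      = pvSt N (pvOld m N) := by
  intro fuel
  induction fuel with
  | zero =>
    intro k h h1 h2
    have hk : k = N + 1 := by omega
    subst hk
    unfold pvLoopB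
    rw [if_neg (by exact_mod_cast (by omega : ¬ ((N + 1 : ℕ) : Int) ≤ (N : Int)))]
    rw [show N + 1 - 1 = N by omega]
    rfl
  | succ f ih =>
    intro k h h1 h2
    by_cases hk : k ≤ N
    · have hc' : PySem.Int.floordiv (((N.choose (k - 1) : ℕ) : Int) * ((N : Int) - (k : Int) + 1)) (k : Int)
          = ((N.choose k : ℕ) : Int) := by
        have hsub : (N : Int) - (k : Int) + 1 = ((N - (k - 1) : ℕ) : Int) := by
          have he : N - (k - 1) = N - k + 1 := by omega
          rw [he]; push_cast [Nat.cast_sub hk]; ring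
        rw [hsub, ← Nat.cast_mul]
        have hprod : N.choose (k - 1) * (N - (k - 1)) = N.choose k * k := by
          have hcs := Nat.choose_succ_right_eq N (k - 1)
          rw [show k - 1 + 1 = k by omega] at hcs
          omega
        rw [hprod, PySem.Int.floordiv_natCast]
        rw [Nat.mul_div_cancel _ (by omega : 0 < k)]
      have hset : (pvSt N (pvGB m N (k - 1))).set ((k : Int)).toNat
          (PySem.Int.mod ((N.choose k : ℕ) : Int) m) = pvSt N (pvGB m N k) := by
        rw [show ((k : Int)).toNat = k by simp, pvSt_set]
        apply pvSt_congr
        intro t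
        by_cases ht : t = k
        · rw [if_pos ht, ht]
          unfold pvGB
          rw [if_neg (by omega), if_pos (le_refl k)]
        · rw [if_neg ht]
          unfold pvGB
          by_cases ht0 : t = 0
          · simp [ht0]
          · rw [if_neg ht0, if_neg ht0]
            by_cases htk : t ≤ k - 1
            · rw [if_pos htk, if_pos (by omega)]
            · rw [if_neg htk, if_neg (by omega)]
      unfold pvLoopB
      rw [if_pos (by exact_mod_cast hk)]
      simp only [hc', hset]
      have hk1 : ((k : Int) + 1) = ((k + 1 : ℕ) : Int) := by push_cast; ring
      rw [hk1]
      have h' := ih (k + 1) (by omega) (by omega) (by omega)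
      rw [show k + 1 - 1 = k by omega] at h'
      exact h'
    · have hk' : k = N + 1 := by omega
      subst hk'
      unfold pvLoopB
      rw [if_neg (by exact_mod_cast (by omega : ¬ ((N + 1 : ℕ) : Int) ≤ (N : Int)))]
      rw [show N + 1 - 1 = N by omega]
      rfl

-- B's initial row
theorem pvInitB (N : ℕ) (m : Int) :
    (List.replicate (N + 1) (0 : Int)).set 0 1 = pvSt N (pvGB m N 0) := by
  apply List.ext_getElem
  · simp [pvSt]
  · intro i h1 h2
    simp only [List.getElem_set, List.getElem_replicate, pvSt, List.getElem_map,
      List.getElem_range]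
    unfold pvGB
    by_cases hi : i = 0 <;> simp [hi]
    omega

-- characterization of B
theorem pascal_row_mod_alt_eq (n m : Int) (hn : 0 ≤ n) :
    pascal_row_mod_alt n m = pvSt n.toNat (pvOld m n.toNat) := by
  obtain ⟨N, rfl⟩ : ∃ N : ℕ, n = (N : Int) := ⟨n.toNat, by omega⟩
  simp only [Int.toNat_natCast]
  unfold pascal_row_mod_alt
  rw [show ((N : Int) + 1).toNat = N + 1 by omega, pvInitB N m]
  have h := pvLoopB_eq m N (N + 1 - 1) 1 (le_refl _) (le_refl _) (by omega)
  rw [show (1 : ℕ) - 1 = 0 by omega, Nat.choose_zero_right] at h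
  simpa using h

-- ===== VERDICT (by name: the statement is the Claim_ definition above) =====
theorem pascal_row_mod_spec : Claim_equal_pascal_row_mod := by
  intro n m _ hpre
  unfold Spec_pascal_row_mod
  rw [pascal_row_mod_eq n m hpre.1, pascal_row_mod_alt_eq n m hpre.1]
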